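-- pv_equiv track=rewrite | github.com/Showstopper902/rvc_inferencing | auto_pitch_entry_working_oldpath.py | strip_args
-- ===== SOURCE A (Python) =====
-- def strip_args(argv, keys):
--     """
--     Remove args (and their values) from argv.
--     Example: remove --model X, --input Y, --pitch Z so we can re-add them once.
--     """
--     out = []
--     i = 0
--     keys = set(keys)
--     while i < len(argv):
--         a = argv[i]
--         if a in keys:
--             i += 1
--             # skip value if present and not another flag
--             if i < len(argv) and not argv[i].startswith("--"):
--                 i += 1
--             continue
--         out.append(a)
--         i += 1
--     return out
-- ===== SOURCE B (Python) =====
-- def strip_args(argv, keys):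
--     """Remove args (and their values) from argv.
--     Two staged passes: first mark the indices to drop (each flag and the value
--     it consumes) in an index set, then keep everything else by comprehension."""
--     ks = set(keys)
--     drop = set()
--     last_value = -1  # index already consumed as a value by the previous flag
--     for i, a in enumerate(argv):
--         if a not in ks or i == last_value:
--             continue
--         drop.add(i)
--         if i + 1 < len(argv) and not argv[i + 1].startswith("--"):
--             drop.add(i + 1)
--             last_value = i + 1
--     return [a for i, a in enumerate(argv) if i not in drop]
-- ===== Notes on version B (the rewrite author's own statement) =====
-- stated objective: alternative
-- what changed: A's index-jumping while loop that appends kept tokens as it goes is replaced by two staged passes: a marking pass that records the indices of flags and their consumed values in an index set, then a comprehension over enumerate(argv) keeping every unmarked index.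
import Mathlib
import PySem

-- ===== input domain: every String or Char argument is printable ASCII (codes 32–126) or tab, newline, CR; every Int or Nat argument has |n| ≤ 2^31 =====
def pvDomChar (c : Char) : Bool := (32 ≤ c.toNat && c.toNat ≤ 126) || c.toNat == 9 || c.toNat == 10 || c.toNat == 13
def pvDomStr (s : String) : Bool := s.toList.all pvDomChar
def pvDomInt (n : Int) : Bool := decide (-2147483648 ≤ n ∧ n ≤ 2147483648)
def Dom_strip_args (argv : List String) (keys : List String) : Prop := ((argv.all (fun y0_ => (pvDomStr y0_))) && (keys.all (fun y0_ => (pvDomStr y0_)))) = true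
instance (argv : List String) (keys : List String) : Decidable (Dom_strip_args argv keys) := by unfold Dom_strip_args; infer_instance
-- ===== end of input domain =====

-- B replaces A's index-jumping while loop by two staged passes: mark the indices to drop in an
-- index set, then keep the rest by a comprehension (alternative decomposition; same cost).

-- ===== PORT A =====
-- while loop over index i; a flag consumes the next token unless it starts with "--"
def stripArgsLoopA (argv : List String) (ks : PySem.Set String) (i : Nat) (out : List String) : List String :=
  if h : i < argv.length then
    let a := argv[i]
    if PySem.Set.contains ks a then
      -- i += 1; skip value if present and not another flag
      if h2 : i + 1 < argv.length then
        if ¬ (PySem.Str.startswith argv[i+1] "--" = true) then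
          stripArgsLoopA argv ks (i + 2) out
        else
          stripArgsLoopA argv ks (i + 1) out
      else
        stripArgsLoopA argv ks (i + 1) out
    else
      stripArgsLoopA argv ks (i + 1) (out ++ [a])
  else out
termination_by argv.length - i

def strip_args (argv : List String) (keys : List String) : List String :=
  stripArgsLoopA argv (PySem.Set.ofList keys) 0 []

-- ===== PORT B =====
-- one step of B's marking loop: state = (drop, last_value)
def stripArgsMarkB (argv : List String) (ks : PySem.Set String)
    (st : PySem.Set Int × Int) (p : Int × String) : PySem.Set Int × Int :=
  if ¬ (PySem.Set.contains ks p.2 = true) ∨ p.1 = st.2 then st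
  else
    let drop := PySem.Set.add st.1 p.1
    if p.1 + 1 < (argv.length : Int) ∧
        ¬ (PySem.Str.startswith (PySem.List.pyGetD argv (p.1 + 1) "") "--" = true) then
      (PySem.Set.add drop (p.1 + 1), p.1 + 1)
    else
      (drop, st.2)

def strip_args_alt (argv : List String) (keys : List String) : List String :=
  let ks := PySem.Set.ofList keys
  let final := (PySem.List.enumerate argv).foldl (stripArgsMarkB argv ks) (PySem.Set.empty, -1)
  ((PySem.List.enumerate argv).filter
      (fun p => ¬ (PySem.Set.contains final.1 p.1 = true))).map Prod.snd

-- ===== PRECONDITION & SPEC =====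
def Spec_strip_args (argv : List String) (keys : List String) (out : List String) : Prop := out = strip_args_alt argv keys
instance (argv : List String) (keys : List String) (out : List String) : Decidable (Spec_strip_args argv keys out) := by unfold Spec_strip_args; infer_instance

-- ===== CLAIM (what is proved, stated in full; the proofs are below) =====
def Claim_equal_strip_args : Prop := ∀ (argv : List String) (keys : List String), Dom_strip_args argv keys → Spec_strip_args argv keys (strip_args argv keys)

-- ===== LEMMAS AND PROOFS =====

-- adding an element to a set leaves membership of other elements unchanged
theorem pvContainsAddNe (s : PySem.Set Int) (x j : Int) (h : j ≠ x) :
    PySem.Set.contains (PySem.Set.add s x) j = PySem.Set.contains s j := by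
  by_cases hm : j ∈ s
  · rw [(PySem.Set.contains_iff _ _).mpr hm,
      (PySem.Set.contains_iff _ _).mpr ((PySem.Set.mem_add _ _ _).mpr (Or.inl hm))]
  · have h1 : PySem.Set.contains s j ≠ true := fun hc => hm ((PySem.Set.contains_iff _ _).mp hc)
    have h2 : PySem.Set.contains (PySem.Set.add s x) j ≠ true := by
      intro hc
      rcases (PySem.Set.mem_add _ _ _).mp ((PySem.Set.contains_iff _ _).mp hc) with h' | h'
      · exact hm h'
      · exact h h'
    rw [Bool.eq_false_iff.mpr h2, Bool.eq_false_iff.mpr h1]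

-- (PySem.List.enumerate xs s).drop i = enumerate of the dropped list, offset by i
theorem enumerate_drop (xs : List String) : ∀ (s : Int) (i : Nat),
    (PySem.List.enumerate xs s).drop i = PySem.List.enumerate (xs.drop i) (s + i) := by
  intro s i
  induction xs generalizing s i with
  | nil => simp [PySem.List.enumerate_nil]
  | cons x xs ih =>
    cases i with
    | zero => simp
    | succ n =>
      rw [PySem.List.enumerate_cons, List.drop_succ_cons, List.drop_succ_cons, ih]
      congr 1
      push_cast
      ring

-- the enumerate suffix from position i starts with (i, argv[i])
theorem enumerate_drop_cons (argv : List String) (i : Nat) (h : i < argv.length) :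
    (PySem.List.enumerate argv).drop i
      = ((i : Int), argv[i]) :: (PySem.List.enumerate argv).drop (i + 1) := by
  rw [enumerate_drop, List.drop_eq_getElem_cons h, PySem.List.enumerate_cons, enumerate_drop]
  norm_num

-- marking steps at positions ≥ i never change membership of an index < i
theorem markRun_mono (argv : List String) (ks : PySem.Set String) :
    ∀ (n i : Nat) (st : PySem.Set Int × Int), argv.length ≤ i + n →
      ∀ (j : Int), j < (i : Int) →
        PySem.Set.contains ((((PySem.List.enumerate argv).drop i).foldl (stripArgsMarkB argv ks) st).1) j
          = PySem.Set.contains st.1 j := by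
  intro n
  induction n with
  | zero =>
    intro i st hn j hj
    rw [enumerate_drop, List.drop_eq_nil_of_le (by omega)]
    simp [PySem.List.enumerate_nil]
  | succ n ih =>
    intro i st hn j hj
    by_cases h : i < argv.length
    · rw [enumerate_drop_cons argv i h, List.foldl_cons,
        ih (i+1) _ (by omega) j (by push_cast; omega)]
      unfold stripArgsMarkB
      split_ifs with h1 h2
      · rfl
      · simp only
        rw [pvContainsAddNe _ _ _ (by omega), pvContainsAddNe _ _ _ (by omega)]
      · simp only
        rw [pvContainsAddNe _ _ _ (by omega)]
    · rw [enumerate_drop, List.drop_eq_nil_of_le (by omega)]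
      simp [PySem.List.enumerate_nil]

-- main invariant: A's loop from index i equals "keep what the finished marking run does not drop",
-- provided no index ≥ i is marked yet and last_value lies strictly before i
theorem loopA_eq_markB (argv : List String) (ks : PySem.Set String) :
    ∀ (n i : Nat) (out : List String) (drop : PySem.Set Int) (lv : Int),
      argv.length ≤ i + n →
      lv < (i : Int) →
      (∀ j : Int, (i : Int) ≤ j → PySem.Set.contains drop j = false) →
      stripArgsLoopA argv ks i out
        = out ++ (((PySem.List.enumerate argv).drop i).filter
            (fun p => ¬ (PySem.Set.contains
              ((((PySem.List.enumerate argv).drop i).foldl (stripArgsMarkB argv ks) (drop, lv)).1) p.1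
                = true))).map Prod.snd := by
  intro n
  induction n with
  | zero =>
    intro i out drop lv hn hlv hfut
    rw [stripArgsLoopA, dif_neg (by omega), enumerate_drop, List.drop_eq_nil_of_le (by omega)]
    simp [PySem.List.enumerate_nil]
  | succ n ih =>
    intro i out drop lv hn hlv hfut
    rw [stripArgsLoopA]
    by_cases h : i < argv.length
    · rw [dif_pos h]
      rw [enumerate_drop_cons argv i h, List.foldl_cons, List.filter_cons]
      by_cases hk : PySem.Set.contains ks argv[i] = true
      · rw [if_pos hk]
        have hstep0 : stripArgsMarkB argv ks (drop, lv) ((i : Int), argv[i])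
            = if ((i : Int)) + 1 < (argv.length : Int) ∧
                ¬ (PySem.Str.startswith (PySem.List.pyGetD argv ((i : Int) + 1) "") "--" = true) then
                (PySem.Set.add (PySem.Set.add drop (i : Int)) ((i : Int) + 1), (i : Int) + 1)
              else (PySem.Set.add drop (i : Int), lv) := by
          unfold stripArgsMarkB
          rw [if_neg (by push Not; exact ⟨hk, by omega⟩)]
        by_cases h2 : i + 1 < argv.length
        · have hget : PySem.List.pyGetD argv ((i : Int) + 1) "" = argv[i+1] := by
            have hcast : ((i : Int) + 1) = ((i + 1 : Nat) : Int) := by push_cast; ring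
            rw [hcast, PySem.List.pyGetD_natCast]
            simp [List.getD, h2]
          rw [dif_pos h2]
          by_cases hs : PySem.Str.startswith argv[i+1] "--" = true
          · -- value starts with "--": A re-tests it at i+1; B marks only the flag
            have hs' : PySem.Chars.startswith argv[i+1].toList ['-', '-'] = true := by
              simpa using hs
            rw [if_neg (by simpa using hs)]
            have hstep : stripArgsMarkB argv ks (drop, lv) ((i : Int), argv[i])
                = (PySem.Set.add drop (i : Int), lv) := by
              rw [hstep0, if_neg (by rw [hget]; simp [hs'])]
            rw [hstep]
            have hmono := markRun_mono argv ks n (i+1) (PySem.Set.add drop (i : Int), lv)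
              (by omega)
            have hFi : PySem.Set.contains
                ((((PySem.List.enumerate argv).drop (i+1)).foldl (stripArgsMarkB argv ks)
                  (PySem.Set.add drop (i : Int), lv)).1) (i : Int) = true := by
              rw [hmono (i : Int) (by push_cast; omega)]
              exact (PySem.Set.contains_iff _ _).mpr
                ((PySem.Set.mem_add _ _ _).mpr (Or.inr rfl))
            have hFm := (PySem.Set.contains_iff _ _).mp hFi
            rw [ih (i+1) out (PySem.Set.add drop (i : Int)) lv (by omega)
              (by push_cast; omega)
              (fun j hj => by
                rw [pvContainsAddNe _ _ _ (by push_cast at hj ⊢; omega)]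
                exact hfut j (by push_cast at hj ⊢; omega))]
            simp [hFm]
          · -- ordinary value: A skips both; B marks flag and value
            rw [if_pos (by simpa using hs)]
            have hstep : stripArgsMarkB argv ks (drop, lv) ((i : Int), argv[i])
                = (PySem.Set.add (PySem.Set.add drop (i : Int)) ((i : Int) + 1), (i : Int) + 1) := by
              rw [hstep0, if_pos ⟨by exact_mod_cast h2, by rw [hget]; exact hs⟩]
            rw [hstep, enumerate_drop_cons argv (i+1) h2, List.foldl_cons, List.filter_cons]
            have hstep2 : stripArgsMarkB argv ks
                (PySem.Set.add (PySem.Set.add drop (i : Int)) ((i : Int) + 1), (i : Int) + 1)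
                (((i+1 : Nat) : Int), argv[i+1])
                = (PySem.Set.add (PySem.Set.add drop (i : Int)) ((i : Int) + 1), (i : Int) + 1) := by
              unfold stripArgsMarkB
              rw [if_pos (Or.inr (by push_cast; ring))]
            rw [hstep2]
            have hmono := markRun_mono argv ks n (i+1+1)
              (PySem.Set.add (PySem.Set.add drop (i : Int)) ((i : Int) + 1), (i : Int) + 1)
              (by omega)
            have hFi : PySem.Set.contains
                ((((PySem.List.enumerate argv).drop (i+1+1)).foldl (stripArgsMarkB argv ks)
                  (PySem.Set.add (PySem.Set.add drop (i : Int)) ((i : Int) + 1), (i : Int) + 1)).1)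
                (i : Int) = true := by
              rw [hmono (i : Int) (by push_cast; omega)]
              exact (PySem.Set.contains_iff _ _).mpr
                ((PySem.Set.mem_add _ _ _).mpr (Or.inl ((PySem.Set.mem_add _ _ _).mpr (Or.inr rfl))))
            have hFi1 : PySem.Set.contains
                ((((PySem.List.enumerate argv).drop (i+1+1)).foldl (stripArgsMarkB argv ks)
                  (PySem.Set.add (PySem.Set.add drop (i : Int)) ((i : Int) + 1), (i : Int) + 1)).1)
                ((i : Int) + 1) = true := by
              rw [hmono ((i : Int)+1) (by push_cast; omega)]
              exact (PySem.Set.contains_iff _ _).mpr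
                ((PySem.Set.mem_add _ _ _).mpr (Or.inr rfl))
            have hFm := (PySem.Set.contains_iff _ _).mp hFi
            have hFm1 := (PySem.Set.contains_iff _ _).mp hFi1
            rw [show i + 1 + 1 = i + 2 from rfl] at hFm hFm1 ⊢
            rw [ih (i+2) out (PySem.Set.add (PySem.Set.add drop (i : Int)) ((i : Int) + 1))
              ((i : Int) + 1) (by omega) (by push_cast; omega)
              (fun j hj => by
                rw [pvContainsAddNe _ _ _ (by push_cast at hj ⊢; omega),
                  pvContainsAddNe _ _ _ (by push_cast at hj ⊢; omega)]
                exact hfut j (by push_cast at hj ⊢; omega))]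
            simp [hFm, hFm1]
        · -- trailing flag: nothing follows it
          rw [dif_neg h2]
          have hstep : stripArgsMarkB argv ks (drop, lv) ((i : Int), argv[i])
              = (PySem.Set.add drop (i : Int), lv) := by
            rw [hstep0, if_neg (by push Not; intro hlt; exfalso; omega)]
          rw [hstep]
          have hmono := markRun_mono argv ks n (i+1) (PySem.Set.add drop (i : Int), lv)
            (by omega)
          have hFi : PySem.Set.contains
              ((((PySem.List.enumerate argv).drop (i+1)).foldl (stripArgsMarkB argv ks)
                (PySem.Set.add drop (i : Int), lv)).1) (i : Int) = true := by
            rw [hmono (i : Int) (by push_cast; omega)]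
            exact (PySem.Set.contains_iff _ _).mpr
              ((PySem.Set.mem_add _ _ _).mpr (Or.inr rfl))
          have hFm := (PySem.Set.contains_iff _ _).mp hFi
          rw [ih (i+1) out (PySem.Set.add drop (i : Int)) lv (by omega)
            (by push_cast; omega)
            (fun j hj => by
              rw [pvContainsAddNe _ _ _ (by push_cast at hj ⊢; omega)]
              exact hfut j (by push_cast at hj ⊢; omega))]
          simp [hFm]
      · -- ordinary token: kept by both
        rw [if_neg hk]
        have hstep : stripArgsMarkB argv ks (drop, lv) ((i : Int), argv[i]) = (drop, lv) := by
          unfold stripArgsMarkB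
          rw [if_pos (Or.inl (by simpa using hk))]
        rw [hstep]
        have hmono := markRun_mono argv ks n (i+1) (drop, lv) (by omega)
        have hFi : PySem.Set.contains
            ((((PySem.List.enumerate argv).drop (i+1)).foldl (stripArgsMarkB argv ks)
              (drop, lv)).1) (i : Int) = false := by
          rw [hmono (i : Int) (by push_cast; omega)]
          exact hfut (i : Int) (by omega)
        have hFm : ¬ ((i : Int) ∈
            (((PySem.List.enumerate argv).drop (i+1)).foldl (stripArgsMarkB argv ks)
              (drop, lv)).1) := fun hm => by
          rw [(PySem.Set.contains_iff _ _).mpr hm] at hFi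
          exact absurd hFi (by simp)
        rw [ih (i+1) (out ++ [argv[i]]) drop lv (by omega) (by push_cast; omega)
          (fun j hj => hfut j (by push_cast at hj ⊢; omega))]
        simp [hFm]
    · rw [dif_neg h, enumerate_drop, List.drop_eq_nil_of_le (by omega)]
      simp [PySem.List.enumerate_nil]

-- ===== VERDICT (by name: the statement is the Claim_ definition above) =====
theorem strip_args_spec : Claim_equal_strip_args := by
  intro argv keys _
  unfold Spec_strip_args strip_args strip_args_alt
  have := loopA_eq_markB argv (PySem.Set.ofList keys) argv.length 0 [] PySem.Set.empty (-1)
    (by omega) (by norm_num) (fun j _ => rfl)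
  simpa using this
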